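-- pv_equiv track=rewrite | github.com/jtn0123/GOES_VFI | fix_long_lines_enhanced.py | fix_function_call
-- ===== SOURCE A (Python) =====
-- def fix_function_call(line: str, indent: str) -> str:
--     """Split a long function call by putting arguments on separate lines."""
--     # Check if this is a function call with arguments
--     if '(' in line and ')' in line and not line.strip().startswith('#'):
--         # Find the opening parenthesis position
--         open_paren_pos = line.index('(')
--         function_name = line[:open_paren_pos].strip()
--
--         # Check if there are arguments and a closing parenthesis
--         if line.count('(') == line.count(')'):
--             # Extract arguments part
--             args_part = line[open_paren_pos + 1:line.rindex(')')]
--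
--             # If there are arguments to split
--             if args_part.strip():
--                 # Find the arguments by splitting on commas, but handle commas inside parentheses/brackets
--                 depth = 0
--                 args = []
--                 current_arg = ""
--
--                 for char in args_part:
--                     if char in '([{':
--                         depth += 1
--                     elif char in ')]}':
--                         depth -= 1
--
--                     if char == ',' and depth == 0:
--                         args.append(current_arg.strip())
--                         current_arg = ""
--                     else:
--                         current_arg += char
--
--                 # Add the last argument
--                 if current_arg.strip():
--                     args.append(current_arg.strip())
--
--                 # Reconstruct with arguments on separate lines
--                 result = f"{function_name}(\n"
--                 for i, arg in enumerate(args):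
--                     if i < len(args) - 1:
--                         result += f"{indent}    {arg},\n"
--                     else:
--                         result += f"{indent}    {arg}\n"
--                 result += f"{indent}){line[line.rindex(')')+1:]}"
--
--                 return result
--
--     return line
-- ===== SOURCE B (Python) =====
-- def _cut(s):
--     """Index of the first top-level (bracket-depth-0) comma in s, or None."""
--     depth = 0
--     for i, ch in enumerate(s):
--         if ch in '([{':
--             depth += 1
--         elif ch in ')]}':
--             depth -= 1
--         elif ch == ',' and depth == 0:
--             return i
--     return None
--
--
-- def fix_function_call(line: str, indent: str) -> str:
--     """Split a long function call by putting arguments on separate lines."""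
--     if '(' not in line or ')' not in line or line.strip().startswith('#'):
--         return line
--     if line.count('(') != line.count(')'):
--         return line
--     open_pos = line.index('(')
--     close_pos = line.rindex(')')
--     args_part = line[open_pos + 1:close_pos]
--     if not args_part.strip():
--         return line
--     # repeatedly cut off the text up to the next top-level comma
--     args = []
--     rest = args_part
--     while True:
--         i = _cut(rest)
--         if i is None:
--             break
--         args.append(rest[:i].strip())
--         rest = rest[i + 1:]
--     last = rest.strip()
--     if last:
--         args.append(last)
--     name = line[:open_pos].strip()
--     body = ',\n'.join(indent + '    ' + a for a in args)
--     return name + '(\n' + body + '\n' + indent + ')' + line[close_pos + 1:]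
-- ===== Notes on version B (the rewrite author's own statement) =====
-- stated objective: alternative
-- what changed: A splits the argument text with one fold carrying (depth, args, current_arg) accumulators and assembles the output with an index-tested enumerate loop; B instead repeatedly scans for the next top-level comma, slices the segment off, and joins the argument lines with str.join.
import Mathlib
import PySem

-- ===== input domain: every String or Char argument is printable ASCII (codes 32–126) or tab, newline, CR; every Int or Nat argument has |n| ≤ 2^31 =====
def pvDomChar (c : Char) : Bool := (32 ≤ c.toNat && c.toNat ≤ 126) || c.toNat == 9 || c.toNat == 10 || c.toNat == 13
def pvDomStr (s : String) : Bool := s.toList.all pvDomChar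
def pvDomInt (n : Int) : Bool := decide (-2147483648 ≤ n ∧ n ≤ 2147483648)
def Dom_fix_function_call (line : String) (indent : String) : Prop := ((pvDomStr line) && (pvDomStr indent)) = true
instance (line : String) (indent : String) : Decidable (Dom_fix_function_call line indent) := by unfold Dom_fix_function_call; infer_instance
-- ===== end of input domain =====

-- B re-implements the comma-splitting core by repeated scan-for-next-top-level-comma + slice
-- instead of A's single fold carrying (depth, args, current_arg); same return value (alternative decomposition).

-- ===== PORT A =====
-- state: (depth, args, current_arg); Python updates depth, then tests ',' at depth 0
def aStep (s : Int × List (List Char) × List Char) (c : Char) : Int × List (List Char) × List Char :=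
  let d := if c = '(' ∨ c = '[' ∨ c = '{' then s.1 + 1
           else if c = ')' ∨ c = ']' ∨ c = '}' then s.1 - 1 else s.1
  if c = ',' ∧ d = 0 then (d, s.2.1 ++ [PySem.Chars.strip s.2.2], [])
  else (d, s.2.1, s.2.2 ++ [c])

def fix_function_call (line : String) (indent : String) : String :=
  let L := line.toList
  if PySem.Chars.isIn ['('] L && PySem.Chars.isIn [')'] L
     && !(PySem.Chars.startswith (PySem.Chars.strip L) ['#']) then
    -- line.index('(') / line.rindex(')'): the guard ensures presence, so find/rfind are exact
    let openPos : Int := PySem.Chars.find L ['(']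
    let functionName := PySem.Chars.strip (PySem.Chars.slice L none (some openPos))
    if PySem.Chars.count L ['('] == PySem.Chars.count L [')'] then
      let closePos : Int := PySem.Chars.rfind L [')']
      let argsPart := PySem.Chars.slice L (some (openPos + 1)) (some closePos)
      if !(PySem.Chars.strip argsPart).isEmpty then
        let st := argsPart.foldl aStep (0, [], [])
        let args := if !(PySem.Chars.strip st.2.2).isEmpty
                    then st.2.1 ++ [PySem.Chars.strip st.2.2] else st.2.1
        let res := functionName ++ ('(' :: '\n' :: [])
        let res := (PySem.List.enumerate args 0).foldl (fun r p =>
            if p.1 < (args.length : Int) - 1 then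
              r ++ indent.toList ++ (' ' :: ' ' :: ' ' :: ' ' :: []) ++ p.2 ++ (',' :: '\n' :: [])
            else
              r ++ indent.toList ++ (' ' :: ' ' :: ' ' :: ' ' :: []) ++ p.2 ++ ('\n' :: [])) res
        String.ofList (res ++ indent.toList ++ [')'] ++ PySem.Chars.slice L (some (closePos + 1)) none)
      else line
    else line
  else line

-- ===== PORT B =====
-- _cut: first index of a depth-0 comma (early-return for loop → structural recursion)
def cutTop : List Char → Int → Nat → Option Nat
  | [], _, _ => none
  | c :: cs, depth, i =>
    let d := if c = '(' ∨ c = '[' ∨ c = '{' then depth + 1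
             else if c = ')' ∨ c = ']' ∨ c = '}' then depth - 1 else depth
    if c = ',' ∧ d = 0 then some i else cutTop cs d (i + 1)

theorem cutTop_lt : ∀ (cs : List Char) (d : Int) (i j : Nat),
    cutTop cs d i = some j → j < i + cs.length := by
  intro cs
  induction cs with
  | nil => intro d i j h; simp [cutTop] at h
  | cons c cs ih =>
    intro d i j h
    simp only [cutTop] at h
    by_cases hc : c = ',' ∧ (if c = '(' ∨ c = '[' ∨ c = '{' then d + 1
        else if c = ')' ∨ c = ']' ∨ c = '}' then d - 1 else d) = 0
    · rw [if_pos hc] at h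
      injection h with h; subst h
      simp
    · rw [if_neg hc] at h
      have := ih _ _ _ h
      simp only [List.length_cons]
      omega

-- the while loop: cut off segments up to each top-level comma (i < rest.length, so
-- rest[:i] = take i rest and rest[i+1:] = drop (i+1) rest — exact)
def bSplitLoop (args : List (List Char)) (rest : List Char) : List (List Char) × List Char :=
  match h : cutTop rest 0 0 with
  | none => (args, rest)
  | some i => bSplitLoop (args ++ [PySem.Chars.strip (rest.take i)]) (rest.drop (i + 1))
termination_by rest.length
decreasing_by
  have := cutTop_lt rest 0 0 i h
  simp; omega

def fix_function_call_alt (line : String) (indent : String) : String :=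
  let L := line.toList
  if !(PySem.Chars.isIn ['('] L) || !(PySem.Chars.isIn [')'] L)
     || PySem.Chars.startswith (PySem.Chars.strip L) ['#'] then line
  else if !(PySem.Chars.count L ['('] == PySem.Chars.count L [')']) then line
  else
    let openPos : Int := PySem.Chars.find L ['(']
    let closePos : Int := PySem.Chars.rfind L [')']
    let argsPart := PySem.Chars.slice L (some (openPos + 1)) (some closePos)
    if (PySem.Chars.strip argsPart).isEmpty then line
    else
      let p := bSplitLoop [] argsPart
      let lastSeg := PySem.Chars.strip p.2
      let args := if lastSeg.isEmpty then p.1 else p.1 ++ [lastSeg]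
      let name := PySem.Chars.strip (PySem.Chars.slice L none (some openPos))
      let body := PySem.Chars.join (',' :: '\n' :: [])
        (args.map (fun a => indent.toList ++ (' ' :: ' ' :: ' ' :: ' ' :: []) ++ a))
      String.ofList (name ++ ('(' :: '\n' :: []) ++ body ++ ['\n'] ++ indent.toList ++ [')']
        ++ PySem.Chars.slice L (some (closePos + 1)) none)

-- ===== PRECONDITION & SPEC =====
def Spec_fix_function_call (line : String) (indent : String) (out : String) : Prop := out = fix_function_call_alt line indent
instance (line : String) (indent : String) (out : String) : Decidable (Spec_fix_function_call line indent out) := by unfold Spec_fix_function_call; infer_instance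

-- ===== CLAIM (what is proved, stated in full; the proofs are below) =====
def Claim_equal_fix_function_call : Prop := ∀ (line : String) (indent : String), Dom_fix_function_call line indent → Spec_fix_function_call line indent (fix_function_call line indent)

-- ===== LEMMAS AND PROOFS =====

theorem cutTop_shift (cs : List Char) : ∀ (d : Int) (i : Nat),
    cutTop cs d i = (cutTop cs d 0).map (i + ·) := by
  induction cs with
  | nil => intro d i; simp [cutTop]
  | cons c cs ih =>
    intro d i
    simp only [cutTop]
    by_cases hc : c = ',' ∧ (if c = '(' ∨ c = '[' ∨ c = '{' then d + 1
        else if c = ')' ∨ c = ']' ∨ c = '}' then d - 1 else d) = 0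
    · rw [if_pos hc, if_pos hc]; simp
    · rw [if_neg hc, if_neg hc]
      rw [ih, ih _ 1]
      cases cutTop cs (if c = '(' ∨ c = '[' ∨ c = '{' then d + 1
          else if c = ')' ∨ c = ']' ∨ c = '}' then d - 1 else d) 0 with
      | none => simp
      | some v => simp; omega

-- stepping A's fold up to the first top-level comma
theorem aFold_cut_some : ∀ (cs : List Char) (d : Int) (args : List (List Char)) (cur : List Char) (j : Nat),
    cutTop cs d 0 = some j →
    cs.foldl aStep (d, args, cur)
      = (cs.drop (j + 1)).foldl aStep (0, args ++ [PySem.Chars.strip (cur ++ cs.take j)], []) := by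
  intro cs
  induction cs with
  | nil => intro d args cur j h; simp [cutTop] at h
  | cons c cs ih =>
    intro d args cur j h
    simp only [cutTop] at h
    by_cases hc : c = ',' ∧ (if c = '(' ∨ c = '[' ∨ c = '{' then d + 1
        else if c = ')' ∨ c = ']' ∨ c = '}' then d - 1 else d) = 0
    · rw [if_pos hc] at h
      injection h with h; subst h
      obtain ⟨rfl, hc2⟩ := hc
      have h1 : ¬(',' = '(' ∨ ',' = '[' ∨ ',' = '{') := by decide
      have h2 : ¬(',' = ')' ∨ ',' = ']' ∨ ',' = '}') := by decide
      rw [if_neg h1, if_neg h2] at hc2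
      subst hc2
      have hstep : aStep (0, args, cur) ',' = (0, args ++ [PySem.Chars.strip cur], []) := by
        simp [aStep]
      simp [List.foldl_cons, hstep]
    · rw [if_neg hc] at h
      rw [cutTop_shift] at h
      cases hcut : cutTop cs (if c = '(' ∨ c = '[' ∨ c = '{' then d + 1
          else if c = ')' ∨ c = ']' ∨ c = '}' then d - 1 else d) 0 with
      | none => rw [hcut] at h; simp at h
      | some j' =>
        rw [hcut] at h
        simp at h
        subst h
        rw [List.foldl_cons]
        have hstep : aStep (d, args, cur) c
            = ((if c = '(' ∨ c = '[' ∨ c = '{' then d + 1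
                else if c = ')' ∨ c = ']' ∨ c = '}' then d - 1 else d), args, cur ++ [c]) := by
          simp [aStep, hc]
        rw [hstep, ih _ _ _ _ hcut, Nat.add_comm 1 j']
        simp

theorem aFold_cut_none : ∀ (cs : List Char) (d : Int) (args : List (List Char)) (cur : List Char),
    cutTop cs d 0 = none →
    ((cs.foldl aStep (d, args, cur)).2.1, (cs.foldl aStep (d, args, cur)).2.2) = (args, cur ++ cs) := by
  intro cs
  induction cs with
  | nil => intro d args cur _; simp
  | cons c cs ih =>
    intro d args cur h
    simp only [cutTop] at h
    by_cases hc : c = ',' ∧ (if c = '(' ∨ c = '[' ∨ c = '{' then d + 1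
        else if c = ')' ∨ c = ']' ∨ c = '}' then d - 1 else d) = 0
    · rw [if_pos hc] at h; simp at h
    · rw [if_neg hc] at h
      rw [cutTop_shift] at h
      cases hcut : cutTop cs (if c = '(' ∨ c = '[' ∨ c = '{' then d + 1
          else if c = ')' ∨ c = ']' ∨ c = '}' then d - 1 else d) 0 with
      | some j' => rw [hcut] at h; simp at h
      | none =>
        rw [List.foldl_cons]
        have hstep : aStep (d, args, cur) c
            = ((if c = '(' ∨ c = '[' ∨ c = '{' then d + 1
                else if c = ')' ∨ c = ']' ∨ c = '}' then d - 1 else d), args, cur ++ [c]) := by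
          simp [aStep, hc]
        rw [hstep]
        have := ih _ args (cur ++ [c]) hcut
        simpa using this

-- A's post-processed args list equals B's loop result, post-processed
theorem core_eq : ∀ (n : Nat) (cs : List Char), cs.length ≤ n → ∀ (args : List (List Char)),
    (let st := cs.foldl aStep (0, args, ([] : List Char));
     if !(PySem.Chars.strip st.2.2).isEmpty then st.2.1 ++ [PySem.Chars.strip st.2.2] else st.2.1)
    = (let p := bSplitLoop args cs;
       if (PySem.Chars.strip p.2).isEmpty then p.1 else p.1 ++ [PySem.Chars.strip p.2]) := by
  intro n
  induction n with
  | zero =>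
    intro cs hlen args
    have : cs = [] := List.eq_nil_of_length_eq_zero (Nat.le_zero.mp hlen)
    subst this
    rw [bSplitLoop.eq_def]
    simp [cutTop, PySem.Chars.strip, PySem.Chars.lstrip, PySem.Chars.rstrip]
  | succ n ih =>
    intro cs hlen args
    cases hcut : cutTop cs 0 0 with
    | none =>
      have h := aFold_cut_none cs 0 args [] hcut
      rw [bSplitLoop.eq_def, hcut]
      simp only []
      have h1 : (cs.foldl aStep (0, args, ([] : List Char))).2.1 = args := by
        have := congrArg Prod.fst h; simpa using this
      have h2 : (cs.foldl aStep (0, args, ([] : List Char))).2.2 = cs := by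
        have := congrArg Prod.snd h; simpa using this
      simp only [h1, h2]
      split <;> simp_all
    | some j =>
      have hlt : j < cs.length := by simpa using cutTop_lt cs 0 0 j hcut
      have hstep := aFold_cut_some cs 0 args [] j hcut
      rw [bSplitLoop.eq_def, hcut]
      simp only [hstep, List.nil_append]
      exact ih (cs.drop (j + 1)) (by simp; omega) _

-- B's loop never shrinks the segment list
theorem bSplitLoop_ne : ∀ (n : Nat) (cs : List Char), cs.length ≤ n → ∀ (args : List (List Char)),
    args ≠ [] → (bSplitLoop args cs).1 ≠ [] := by
  intro n
  induction n with
  | zero =>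
    intro cs hlen args hne
    have : cs = [] := List.eq_nil_of_length_eq_zero (Nat.le_zero.mp hlen)
    subst this; rw [bSplitLoop]; simpa [cutTop]
  | succ n ih =>
    intro cs hlen args hne
    rw [bSplitLoop.eq_def]
    cases hcut : cutTop cs 0 0 with
    | none => simpa
    | some j =>
      have hlt : j < cs.length := by simpa using cutTop_lt cs 0 0 j hcut
      exact ih _ (by simp; omega) _ (by simp)

-- A's enumerate loop over a nonempty args list builds exactly B's join
theorem out_eq_aux (N : Int) (h : List Char → List Char) :
    ∀ (args : List (List Char)) (s : Int) (res : List Char), args ≠ [] → s + args.length = N →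
    (PySem.List.enumerate args s).foldl (fun r p =>
        if p.1 < N - 1 then r ++ h p.2 ++ (',' :: '\n' :: []) else r ++ h p.2 ++ ('\n' :: [])) res
      = res ++ PySem.Chars.join (',' :: '\n' :: []) (args.map h) ++ ('\n' :: []) := by
  intro args
  induction args with
  | nil => intro s res hne _; exact absurd rfl hne
  | cons a rest ih =>
    intro s res hne hN
    cases rest with
    | nil =>
      have : ¬ (s < N - 1) := by simp at hN; omega
      simp [PySem.List.enumerate_cons, PySem.List.enumerate_nil, PySem.Chars.join_singleton, this]
    | cons b t =>
      have hlt : s < N - 1 := by simp at hN; omega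
      rw [PySem.List.enumerate_cons, List.foldl_cons]
      simp only [hlt, if_pos]
      rw [ih (s + 1) _ (by simp) (by simp at hN ⊢; omega)]
      simp [PySem.Chars.join_cons_cons]

-- B's final args list is nonempty when the (stripped) argument text is nonempty
theorem argsB_ne (cs : List Char) (h : ¬(PySem.Chars.strip cs).isEmpty = true) :
    (if (PySem.Chars.strip (bSplitLoop [] cs).2).isEmpty then (bSplitLoop [] cs).1
     else (bSplitLoop [] cs).1 ++ [PySem.Chars.strip (bSplitLoop [] cs).2]) ≠ [] := by
  rw [bSplitLoop.eq_def]
  cases hcut : cutTop cs 0 0 with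
  | none =>
    simp only []
    rw [if_neg (by simpa using h)]
    simp
  | some j =>
    have hne := bSplitLoop_ne (cs.drop (j + 1)).length _ le_rfl
      [PySem.Chars.strip (cs.take j)] (by simp)
    simp only []
    split <;> simp_all

-- ===== VERDICT (by name: the statement is the Claim_ definition above) =====
theorem fix_function_call_spec : Claim_equal_fix_function_call := by
  intro line indent _
  unfold Spec_fix_function_call
  simp only [fix_function_call, fix_function_call_alt]
  cases h1 : PySem.Chars.isIn ['('] line.toList with
  | false => simp
  | true =>
  cases h2 : PySem.Chars.isIn [')'] line.toList with
  | false => simp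
  | true =>
  cases h3 : PySem.Chars.startswith (PySem.Chars.strip line.toList) ['#'] with
  | true => simp
  | false =>
  simp only [Bool.not_false, Bool.not_true, Bool.and_self, Bool.or_false, if_true]
  cases hc : (PySem.Chars.count line.toList ['('] == PySem.Chars.count line.toList [')']) with
  | false => simp
  | true =>
  simp only [Bool.not_true, if_true, Bool.false_eq_true, if_false]
  cases hs : (PySem.Chars.strip (PySem.Chars.slice line.toList (some (PySem.Chars.find line.toList ['('] + 1)) (some (PySem.Chars.rfind line.toList [')'])))).isEmpty with
  | true => simp
  | false =>
    simp only [Bool.not_false, if_true, if_false, Bool.false_eq_true]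
    set cs := PySem.Chars.slice line.toList (some (PySem.Chars.find line.toList ['('] + 1))
      (some (PySem.Chars.rfind line.toList [')'])) with hcs
    set h4 : List Char → List Char := fun a => indent.toList ++ [' ', ' ', ' ', ' '] ++ a with hh4
    set argsA := (if (!(PySem.Chars.strip (List.foldl aStep (0, [], []) cs).2.2).isEmpty) = true then
        (List.foldl aStep (0, [], []) cs).2.1 ++ [PySem.Chars.strip (List.foldl aStep (0, [], []) cs).2.2]
      else (List.foldl aStep (0, [], []) cs).2.1) with hA
    set argsB := (if (PySem.Chars.strip (bSplitLoop [] cs).2).isEmpty = true then (bSplitLoop [] cs).1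
      else (bSplitLoop [] cs).1 ++ [PySem.Chars.strip (bSplitLoop [] cs).2]) with hB
    have hAB : argsA = argsB := by
      rw [hA, hB]
      simpa using core_eq cs.length cs le_rfl []
    have hne : argsA ≠ [] := by
      rw [hAB, hB]
      exact argsB_ne cs (by simp [hs])
    have hfun : (fun (r : List Char) (p : Int × List Char) =>
        if p.1 < (argsA.length : Int) - 1 then r ++ indent.toList ++ [' ', ' ', ' ', ' '] ++ p.2 ++ [',', '\n']
        else r ++ indent.toList ++ [' ', ' ', ' ', ' '] ++ p.2 ++ ['\n'])
        = (fun (r : List Char) (p : Int × List Char) =>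
        if p.1 < (argsA.length : Int) - 1 then r ++ h4 p.2 ++ [',', '\n'] else r ++ h4 p.2 ++ ['\n']) := by
      funext r p
      split <;> simp [hh4]
    rw [hfun, out_eq_aux (argsA.length : Int) h4 argsA 0 _ hne (by simp), hAB]
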